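-- pv_equiv track=rewrite | github.com/yykunkun/lintcode_test | venv/part4.py | printX
-- ===== SOURCE A (Python) =====
-- def printX(n):
--     ret = []
--     if n == 0:
--         return ret
--     else:
--         for i in range(n):
--             tmp=''
--             for j in range(n):
--                 if j==i or j==n-i-1:
--                     tmp+='X'
--                 else:
--                     tmp+=' '
--             ret.append(tmp)
--         return ret
-- ===== SOURCE B (Python) =====
-- def printX(n):
--     ret = []
--     for i in range(n):
--         row = [' '] * n
--         row[i] = 'X'
--         row[n - i - 1] = 'X'
--         ret.append(''.join(row))
--     return ret
-- ===== Notes on version B (the rewrite author's own statement) =====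
-- stated objective: simpler
-- what changed: Instead of scanning every column with a per-cell branch and growing the string character by character, B builds a blank row of n spaces once per row, writes 'X' directly at the two computed positions i and n-i-1, and joins.
import Mathlib
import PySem

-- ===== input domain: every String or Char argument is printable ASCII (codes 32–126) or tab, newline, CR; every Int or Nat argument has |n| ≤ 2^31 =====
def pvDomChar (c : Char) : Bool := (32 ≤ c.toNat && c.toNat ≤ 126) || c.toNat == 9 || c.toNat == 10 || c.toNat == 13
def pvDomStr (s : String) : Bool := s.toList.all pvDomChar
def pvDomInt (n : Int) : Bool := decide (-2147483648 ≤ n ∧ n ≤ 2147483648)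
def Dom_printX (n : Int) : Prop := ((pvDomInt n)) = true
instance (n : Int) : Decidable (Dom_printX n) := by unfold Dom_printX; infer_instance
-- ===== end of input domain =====

-- B replaces A's per-cell scan-and-test inner loop by direct placement: a blank row of n
-- spaces is built and 'X' is written at the two computed positions i and n-i-1 (simpler).


-- ===== PORT A =====
-- Python str built by '+='; represented as List Char, wrapped with String.ofList on append to ret.
def printX (n : Int) : List String :=
  if n == 0 then []
  else
    (PySem.List.pyRange 0 n 1).foldl (fun ret i =>
      let tmp : List Char :=
        (PySem.List.pyRange 0 n 1).foldl (fun tmp j =>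
          if j == i || j == n - i - 1 then tmp ++ ['X'] else tmp ++ [' ']) []
      ret ++ [String.ofList tmp]) []

-- ===== PORT B =====
-- row[i] = 'X' with 0 ≤ i < n ported as List.set i.toNat (exact: the index is in range and
-- nonnegative, so no Python negative-index wraparound occurs); ''.join(row) = String.ofList row.
def printX_alt (n : Int) : List String :=
  (PySem.List.pyRange 0 n 1).foldl (fun ret i =>
    let row : List Char := List.replicate n.toNat ' '
    let row := row.set i.toNat 'X'
    let row := row.set (n - i - 1).toNat 'X'
    ret ++ [String.ofList row]) []

-- ===== PRECONDITION & SPEC =====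
def Spec_printX (n : Int) (out : List String) : Prop := out = printX_alt n
instance (n : Int) (out : List String) : Decidable (Spec_printX n out) := by unfold Spec_printX; infer_instance

-- ===== CLAIM (what is proved, stated in full; the proofs are below) =====
def Claim_equal_printX : Prop := ∀ (n : Int), Dom_printX n → Spec_printX n (printX n)

-- ===== LEMMAS AND PROOFS =====

-- the two row constructions agree for each admitted row index i
lemma row_eq (n i : Int) (hi0 : 0 ≤ i) (hin : i < n) :
    (PySem.List.pyRange 0 n 1).foldl (fun tmp j =>
        if j == i || j == n - i - 1 then tmp ++ ['X'] else tmp ++ [' ']) [] =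
    (((List.replicate n.toNat ' ').set i.toNat 'X').set (n - i - 1).toNat 'X') := by
  have h1 : (PySem.List.pyRange 0 n 1).foldl (fun tmp j =>
      if j == i || j == n - i - 1 then tmp ++ ['X'] else tmp ++ [' ']) [] =
      (PySem.List.pyRange 0 n 1).map
        (fun j => if j == i || j == n - i - 1 then 'X' else ' ') := by
    have := PySem.List.foldl_append_singleton_eq_map
      (f := fun j : Int => if j == i || j == n - i - 1 then 'X' else ' ')
      (l := PySem.List.pyRange 0 n 1) (acc := [])
    simp only [List.nil_append] at this
    rw [← this]
    congr 1
    funext tmp j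
    by_cases h : (j == i || j == n - i - 1) = true <;> simp [h]
  rw [h1]
  apply List.ext_getElem
  · simp [PySem.List.length_pyRange_one]
  · intro k hk1 hk2
    simp only [PySem.List.length_pyRange_one, List.length_map] at hk1
    rw [List.getElem_map, PySem.List.getElem_pyRange_one]
    rw [List.getElem_set, List.getElem_set]
    simp only [List.getElem_replicate, zero_add]
    have hk' : (k : Int) < n := by omega
    split_ifs with h1' h2' h3' h4'
    all_goals first
      | rfl
      | (exfalso; simp only [beq_iff_eq, Bool.or_eq_true] at *; omega)

lemma printX_eq_alt (n : Int) : printX n = printX_alt n := by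
  by_cases hn : n ≤ 0
  · have hr : PySem.List.pyRange 0 n 1 = [] := PySem.List.pyRange_one_eq_nil hn
    unfold printX printX_alt
    rw [hr]
    rcases eq_or_ne n 0 with h0 | h0 <;> simp [h0]
  · rw [not_le] at hn
    unfold printX printX_alt
    have h0 : (n == 0) = false := by simp; omega
    rw [h0]
    simp only [Bool.false_eq_true, if_false]
    apply PySem.List.foldl_congr_mem
    intro ret i hi
    rw [PySem.List.mem_pyRange_one] at hi
    rw [row_eq n i hi.1 hi.2]

-- ===== VERDICT (by name: the statement is the Claim_ definition above) =====
theorem printX_spec : Claim_equal_printX := by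
  intro n _
  unfold Spec_printX
  exact printX_eq_alt n
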